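-- pv_equiv track=rewrite | github.com/MrBrantCode/unitest_baseline | mut_generate/mist_train_cf/cf_32956/solution.py | extract_target_polygon
-- ===== SOURCE A (Python) =====
-- def extract_target_polygon(bbox, polygons):
--     min_x, min_y, max_x, max_y = bbox
--     for polygon in polygons:
--         x_coords = [vertex[0] for vertex in polygon]
--         y_coords = [vertex[1] for vertex in polygon]
--         if all(min_x <= x <= max_x and min_y <= y <= max_y for x, y in polygon):
--             return polygon
--     return None
-- ===== SOURCE B (Python) =====
-- def extract_target_polygon(bbox, polygons):
--     min_x, min_y, max_x, max_y = bbox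
--     bad = {i for i, polygon in enumerate(polygons)
--            for x, y in polygon
--            if x < min_x or x > max_x or y < min_y or y > max_y}
--     for i, polygon in enumerate(polygons):
--         if i not in bad:
--             return polygon
--     return None
-- ===== Notes on version B (the rewrite author's own statement) =====
-- stated objective: alternative
-- what changed: B is a staged algorithm: it first builds a set of bad polygon indices in one flattened pass over all (index, vertex) pairs (any vertex outside the bbox marks its polygon's index bad), then returns the first polygon whose index is not in that set; A instead tests each polygon in turn with an inner all() scan and returns on the first passing one.
import Mathlib
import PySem

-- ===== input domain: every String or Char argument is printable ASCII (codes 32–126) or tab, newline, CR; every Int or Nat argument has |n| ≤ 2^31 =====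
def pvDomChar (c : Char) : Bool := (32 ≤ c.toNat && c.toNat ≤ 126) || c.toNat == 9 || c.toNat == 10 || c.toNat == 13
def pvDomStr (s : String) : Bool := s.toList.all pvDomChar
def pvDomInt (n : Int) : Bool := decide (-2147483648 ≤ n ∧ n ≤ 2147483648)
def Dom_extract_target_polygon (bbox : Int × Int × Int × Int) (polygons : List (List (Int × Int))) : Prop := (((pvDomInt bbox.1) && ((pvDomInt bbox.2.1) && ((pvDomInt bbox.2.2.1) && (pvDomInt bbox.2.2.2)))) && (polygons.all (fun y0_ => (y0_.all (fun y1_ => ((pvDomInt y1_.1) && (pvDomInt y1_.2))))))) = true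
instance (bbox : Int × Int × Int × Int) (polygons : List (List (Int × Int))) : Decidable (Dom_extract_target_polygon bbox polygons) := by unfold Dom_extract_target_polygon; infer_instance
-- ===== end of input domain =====

-- B restructures A into two stages: one flattened pass collecting the set of bad polygon
-- indices (any vertex outside the bbox), then a lookup pass returning the first polygon
-- whose index is not in that set; same cost, alternative decomposition.

-- ===== PORT A =====
-- A: loop over polygons; return the first whose vertices all satisfy the chained comparisons.
-- (A also builds x_coords/y_coords, which it never uses; kept as dead lets.)
def pvScanA (min_x min_y max_x max_y : Int) : List (List (Int × Int)) → Option (List (Int × Int))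
  | [] => none
  | polygon :: rest =>
    let _x_coords := polygon.map (fun v => v.1)
    let _y_coords := polygon.map (fun v => v.2)
    if polygon.all (fun v =>
        decide (min_x ≤ v.1) && decide (v.1 ≤ max_x) &&
        decide (min_y ≤ v.2) && decide (v.2 ≤ max_y)) then
      some polygon
    else
      pvScanA min_x min_y max_x max_y rest

def extract_target_polygon (bbox : Int × Int × Int × Int) (polygons : List (List (Int × Int))) : Option (List (Int × Int)) :=
  match bbox with
  | (min_x, min_y, max_x, max_y) => pvScanA min_x min_y max_x max_y polygons

-- ===== PORT B =====
-- the set comprehension's generated list: index i once per vertex of polygons[i] outside the bbox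
def pvBadList (min_x min_y max_x max_y : Int) (polygons : List (List (Int × Int))) : List Int :=
  (PySem.List.enumerate polygons).flatMap (fun ip =>
    (ip.2.filter (fun v =>
        decide (v.1 < min_x) || decide (max_x < v.1) ||
        decide (v.2 < min_y) || decide (max_y < v.2))).map (fun _ => ip.1))

-- the selection loop: first enumerated polygon whose index is not in bad
def pvPickB (bad : PySem.Set Int) : List (Int × List (Int × Int)) → Option (List (Int × Int))
  | [] => none
  | (i, polygon) :: rest =>
    if PySem.Set.contains bad i then pvPickB bad rest else some polygon

def extract_target_polygon_alt (bbox : Int × Int × Int × Int) (polygons : List (List (Int × Int))) : Option (List (Int × Int)) :=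
  match bbox with
  | (min_x, min_y, max_x, max_y) =>
    let bad := PySem.Set.ofList (pvBadList min_x min_y max_x max_y polygons)
    pvPickB bad (PySem.List.enumerate polygons)

-- ===== PRECONDITION & SPEC =====
def Spec_extract_target_polygon (bbox : Int × Int × Int × Int) (polygons : List (List (Int × Int))) (out : Option (List (Int × Int))) : Prop := out = extract_target_polygon_alt bbox polygons
instance (bbox : Int × Int × Int × Int) (polygons : List (List (Int × Int))) (out : Option (List (Int × Int))) : Decidable (Spec_extract_target_polygon bbox polygons out) := by unfold Spec_extract_target_polygon; infer_instance

-- ===== CLAIM (what is proved, stated in full; the proofs are below) =====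
def Claim_equal_extract_target_polygon : Prop := ∀ (bbox : Int × Int × Int × Int) (polygons : List (List (Int × Int))), Dom_extract_target_polygon bbox polygons → Spec_extract_target_polygon bbox polygons (extract_target_polygon bbox polygons)

-- ===== LEMMAS AND PROOFS =====

-- membership in the comprehension's list characterised by the input
theorem pv_mem_badList (mnx mny mxx mxy : Int) (ps : List (List (Int × Int))) (s : Int) (i : Int) :
    (i ∈ (PySem.List.enumerate ps s).flatMap (fun ip =>
      (ip.2.filter (fun v =>
          decide (v.1 < mnx) || decide (mxx < v.1) ||
          decide (v.2 < mny) || decide (mxy < v.2))).map (fun _ => ip.1))) ↔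
    ∃ (k : Nat) (h : k < ps.length), i = s + k ∧
      ∃ v ∈ ps[k], (v.1 < mnx ∨ mxx < v.1 ∨ v.2 < mny ∨ mxy < v.2) := by
  simp only [List.mem_flatMap, List.mem_map, List.mem_filter,
    PySem.List.mem_enumerate_iff]
  constructor
  · rintro ⟨ip, ⟨k, hk, rfl⟩, v, ⟨hv, hcond⟩, rfl⟩
    refine ⟨k, hk, rfl, v, hv, ?_⟩
    simp only [Bool.or_eq_true, decide_eq_true_eq] at hcond
    tauto
  · rintro ⟨k, hk, rfl, v, hv, hcond⟩
    refine ⟨(s + k, ps[k]), ⟨k, hk, rfl⟩, v, ⟨hv, ?_⟩, rfl⟩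
    simp only [Bool.or_eq_true, decide_eq_true_eq]
    tauto

-- core: if membership in bad matches "polygon k has an outside vertex" for each index,
-- the selection loop computes A's scan
theorem pv_pick_eq_scan (mnx mny mxx mxy : Int) (bad : PySem.Set Int)
    (ps : List (List (Int × Int))) (s : Int)
    (H : ∀ (k : Nat) (h : k < ps.length),
      ((s + (k : Int)) ∈ bad ↔ ∃ v ∈ ps[k], (v.1 < mnx ∨ mxx < v.1 ∨ v.2 < mny ∨ mxy < v.2))) :
    pvPickB bad (PySem.List.enumerate ps s) = pvScanA mnx mny mxx mxy ps := by
  induction ps generalizing s with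
  | nil => rfl
  | cons p rest ih =>
    rw [PySem.List.enumerate_cons, pvPickB, pvScanA]
    have h0 := H 0 (by simp)
    simp only [List.getElem_cons_zero, Int.natCast_zero, add_zero] at h0
    have hall : (p.all (fun v =>
        decide (mnx ≤ v.1) && decide (v.1 ≤ mxx) &&
        decide (mny ≤ v.2) && decide (v.2 ≤ mxy)) = true) ↔
        ¬ ∃ v ∈ p, (v.1 < mnx ∨ mxx < v.1 ∨ v.2 < mny ∨ mxy < v.2) := by
      simp only [List.all_eq_true, Bool.and_eq_true, decide_eq_true_eq, not_exists]
      constructor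
      · rintro h v ⟨hv, hc⟩
        have := h v hv; omega
      · intro h v hv
        have := h v; simp only [hv, true_and] at this
        constructor
        · constructor
          · constructor <;> omega
          · omega
        · omega
    by_cases hc : (s ∈ bad)
    · rw [if_pos (by simpa [PySem.Set.contains_iff] using hc)]
      rw [if_neg (by rw [hall]; push Not; simpa using h0.mp hc)]
      exact ih (s + 1) (fun k hk => by
        have := H (k + 1) (by simpa using hk)
        simpa [add_assoc, add_comm, add_left_comm] using this)
    · rw [if_neg (by simpa [PySem.Set.contains_iff] using hc)]
      rw [if_pos (by rw [hall]; exact fun hx => hc (h0.mpr hx))]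

-- ===== VERDICT (by name: the statement is the Claim_ definition above) =====
theorem extract_target_polygon_spec : Claim_equal_extract_target_polygon := by
  intro bbox polygons _
  obtain ⟨mnx, mny, mxx, mxy⟩ := bbox
  unfold Spec_extract_target_polygon extract_target_polygon extract_target_polygon_alt
  refine (pv_pick_eq_scan mnx mny mxx mxy _ polygons 0 ?_).symm
  intro k hk
  rw [PySem.Set.mem_ofList]
  unfold pvBadList
  rw [pv_mem_badList mnx mny mxx mxy polygons 0 ((0 : Int) + k)]
  constructor
  · rintro ⟨k', hk', he, v, hv, hc⟩
    have : k' = k := by omega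
    subst this
    exact ⟨v, hv, hc⟩
  · rintro ⟨v, hv, hc⟩
    exact ⟨k, hk, rfl, v, hv, hc⟩
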